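-- pv_equiv track=rewrite | github.com/StepDan23/MADE_algorithms | hw_7/a.py | get_cum_sum_arr
-- ===== SOURCE A (Python) =====
-- _A_COEF = 2 ** 16
--
-- def get_cum_sum_arr(size, first_elem, x, y):
--     arr = [0 for _ in range(size)]
--     arr[0] = first_elem
--     prev_val = first_elem
--     for i in range(1, size):
--         cur_val = (x * prev_val + y) % _A_COEF
--         arr[i] = arr[i - 1] + cur_val
--         prev_val = cur_val
--     return arr
-- ===== SOURCE B (Python) =====
-- _A_COEF = 2 ** 16
--
-- def _geo(x, k, cache):
--     # sum(x**j for j in range(k)) mod _A_COEF, by halving; cache is pure memoisation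
--     if k == 0:
--         return 0
--     g = cache.get(k)
--     if g is None:
--         p = pow(x, k // 2, _A_COEF)
--         g = (_geo(x, k // 2, cache) * (1 + p)) % _A_COEF
--         if k % 2:
--             g = (g + p * p) % _A_COEF
--         cache[k] = g
--     return g
--
-- def get_cum_sum_arr(size, first_elem, x, y):
--     # closed form of the LCG: k-th value = (x**k * first_elem + y * sum_{j<k} x**j) mod _A_COEF,
--     # each element computed independently by modular exponentiation; running total gives the prefix sums
--     out = [0] * size
--     out[0] = first_elem
--     total = first_elem
--     cache = {}
--     for k in range(1, size):
--         total += (pow(x, k, _A_COEF) * first_elem + y * _geo(x, k, cache)) % _A_COEF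
--         out[k] = total
--     return out
-- ===== Notes on version B (the rewrite author's own statement) =====
-- stated objective: alternative
-- what changed: A generates each LCG value from the previous one with a carried state variable; B computes every element independently from the closed form (x^k*first_elem + y*sum_{j<k} x^j) mod 2^16 using modular exponentiation and a divide-and-conquer geometric sum, then keeps only a running total for the prefix sums.
import Mathlib
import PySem

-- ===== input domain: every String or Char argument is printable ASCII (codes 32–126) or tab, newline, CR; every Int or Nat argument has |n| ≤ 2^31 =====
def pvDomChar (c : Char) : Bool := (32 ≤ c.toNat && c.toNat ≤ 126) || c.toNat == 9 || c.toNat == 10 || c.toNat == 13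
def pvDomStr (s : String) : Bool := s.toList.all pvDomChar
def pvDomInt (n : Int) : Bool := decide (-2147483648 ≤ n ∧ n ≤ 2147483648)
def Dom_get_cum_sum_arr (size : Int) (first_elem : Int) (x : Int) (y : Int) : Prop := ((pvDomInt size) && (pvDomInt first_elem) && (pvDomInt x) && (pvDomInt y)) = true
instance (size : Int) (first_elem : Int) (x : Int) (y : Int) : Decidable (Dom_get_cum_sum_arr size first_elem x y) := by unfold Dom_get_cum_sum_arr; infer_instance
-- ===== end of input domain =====

-- B replaces A's stateful recurrence (each value from the previous one) by the LCG closed form: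
-- the k-th value is (x^k*first_elem + y*sum_{j<k} x^j) mod 2^16, each element computed independently
-- by modular exponentiation and a divide-and-conquer geometric sum. Alternative algorithm, not faster.

-- ===== PORT A =====
-- arr[i] = ... is List.set at the (nonnegative) loop index; arr[i-1] read via pyGetD (index is in range for every admitted input)
def get_cum_sum_arr (size : Int) (first_elem : Int) (x : Int) (y : Int) : List Int :=
  let arr : List Int := (PySem.List.pyRange 0 size 1).map (fun _ => 0)
  let arr := arr.set 0 first_elem
  let st := (PySem.List.pyRange 1 size 1).foldl
    (fun (s : List Int × Int) i =>
      let cur_val := PySem.Int.mod (x * s.2 + y) 65536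
      (s.1.set i.toNat (PySem.List.pyGetD s.1 (i - 1) 0 + cur_val), cur_val))
    (arr, first_elem)
  st.1

-- ===== PORT B =====
-- _geo: k is a nonnegative int wherever B calls it, so it is carried as a Nat; k // 2, k % 2 on
-- nonnegative ints are Nat division/parity; pow(x, k, 65536) is PySem.Int.powMod. Source B's cache
-- argument is pure memoisation of this same recursion, so it is ported as the plain recursion.
def pvGeo (x : Int) (k : Nat) : Int :=
  if k = 0 then 0
  else
    let p := PySem.Int.powMod x (k / 2) 65536
    let g := PySem.Int.mod (pvGeo x (k / 2) * (1 + p)) 65536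
    if k % 2 = 1 then PySem.Int.mod (g + p * p) 65536 else g
decreasing_by omega

def get_cum_sum_arr_alt (size : Int) (first_elem : Int) (x : Int) (y : Int) : List Int :=
  let out : List Int := (PySem.List.pyRange 0 size 1).map (fun _ => 0)
  let out := out.set 0 first_elem
  let st := (PySem.List.pyRange 1 size 1).foldl
    (fun (s : List Int × Int) k =>
      let total := s.2 + PySem.Int.mod (PySem.Int.powMod x k.toNat 65536 * first_elem + y * pvGeo x k.toNat) 65536
      (s.1.set k.toNat total, total))
    (out, first_elem)
  st.1

-- ===== PRECONDITION & SPEC =====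
-- Pre_ excludes exactly size ≤ 0, where A raises IndexError (arr[0] assignment into an empty list).
def Pre_get_cum_sum_arr (size : Int) (first_elem : Int) (x : Int) (y : Int) : Prop := 1 ≤ size
instance (size : Int) (first_elem : Int) (x : Int) (y : Int) : Decidable (Pre_get_cum_sum_arr size first_elem x y) := by unfold Pre_get_cum_sum_arr; infer_instance
def pvWitness_get_cum_sum_arr : Int × Int × Int × Int := (3, 2, 5, 7)

def Spec_get_cum_sum_arr (size : Int) (first_elem : Int) (x : Int) (y : Int) (out : List Int) : Prop := out = get_cum_sum_arr_alt size first_elem x y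
instance (size : Int) (first_elem : Int) (x : Int) (y : Int) (out : List Int) : Decidable (Spec_get_cum_sum_arr size first_elem x y out) := by unfold Spec_get_cum_sum_arr; infer_instance

-- ===== CLAIM (what is proved, stated in full; the proofs are below) =====
def Claim_equal_get_cum_sum_arr : Prop := ∀ (size : Int) (first_elem : Int) (x : Int) (y : Int), Dom_get_cum_sum_arr size first_elem x y → Pre_get_cum_sum_arr size first_elem x y → Spec_get_cum_sum_arr size first_elem x y (get_cum_sum_arr size first_elem x y)

-- ===== LEMMAS AND PROOFS =====

-- the LCG value sequence: lcg 0 = first_elem, lcg (k+1) = (x * lcg k + y) % 2^16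
def pvLcg (f x y : Int) : Nat → Int
  | 0 => f
  | k+1 => PySem.Int.mod (x * pvLcg f x y k + y) 65536

-- its running prefix sums
def pvAcc (f x y : Int) : Nat → Int
  | 0 => f
  | k+1 => pvAcc f x y k + pvLcg f x y (k+1)

def pvOut (f x y : Int) (n : Nat) : List Int := (List.range n).map (pvAcc f x y)

theorem pvOut_succ (f x y : Int) (n : Nat) : pvOut f x y (n+1) = pvOut f x y n ++ [pvAcc f x y n] := by
  simp [pvOut, List.range_succ]

-- ---- A-side invariant ----
theorem pvA_inv (f x y : Int) (N : Nat) (m : Nat) (hm : m + 1 ≤ N) :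
    (PySem.List.pyRange 1 ((m : Int) + 1) 1).foldl
      (fun (s : List Int × Int) i =>
        let cur_val := PySem.Int.mod (x * s.2 + y) 65536
        (s.1.set i.toNat (PySem.List.pyGetD s.1 (i - 1) 0 + cur_val), cur_val))
      ((List.replicate N (0:Int)).set 0 f, f)
    = (pvOut f x y (m+1) ++ List.replicate (N - (m+1)) 0, pvLcg f x y m) := by
  induction m with
  | zero =>
    simp only [Nat.cast_zero, zero_add]
    rw [PySem.List.pyRange_one_eq_nil (by omega)]
    obtain ⟨N', rfl⟩ : ∃ N', N = N' + 1 := ⟨N - 1, by omega⟩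
    simp [pvOut, pvAcc, pvLcg, List.replicate_succ]
  | succ m ih =>
    have h1 : (1:Int) ≤ (m:Int) + 1 := by omega
    push_cast
    rw [PySem.List.pyRange_one_succ_right h1, List.foldl_append, ih (by omega)]
    simp only [List.foldl_cons, List.foldl_nil]
    have hlen : (pvOut f x y (m+1)).length = m + 1 := by simp [pvOut]
    have hget : PySem.List.pyGetD (pvOut f x y (m+1) ++ List.replicate (N - (m+1)) (0:Int)) ((m:Int) + 1 - 1) 0
        = pvAcc f x y m := by
      rw [show ((m:Int) + 1 - 1) = ((m : Nat) : Int) by ring, PySem.List.pyGetD_natCast]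
      rw [List.getD_append _ _ _ _ (by omega)]
      simp [pvOut]
    have htoNat : ((m:Int) + 1).toNat = m + 1 := by omega
    rw [hget, htoNat, Prod.mk.injEq]
    refine ⟨?_, ?_⟩
    · rw [List.set_append_right _ _ (by omega), hlen]
      have : m + 1 - (m+1) = 0 := by omega
      rw [this]
      obtain ⟨K, hK⟩ : ∃ K, N - (m+1) = K + 1 := ⟨N - (m+2), by omega⟩
      rw [hK, List.replicate_succ, List.set_cons_zero]
      have hN : N - (m+1+1) = K := by omega
      rw [hN]
      simp [pvOut_succ, pvAcc, pvLcg, PySem.Int.mod]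
    · simp [pvLcg]

theorem pvA_eq (size f x y : Int) (h : 1 ≤ size) :
    get_cum_sum_arr size f x y = pvOut f x y size.toNat := by
  unfold get_cum_sum_arr
  have hrep : (PySem.List.pyRange 0 size 1).map (fun _ => (0:Int)) = List.replicate size.toNat 0 := by
    rw [PySem.List.pyRange_one]
    simp [List.map_map, Function.comp_def, List.map_const']
  simp only [hrep]
  obtain ⟨m, hm⟩ : ∃ m : Nat, size = (m : Int) + 1 := ⟨(size - 1).toNat, by omega⟩
  subst hm
  have := pvA_inv f x y ((m:Int)+1).toNat m (by omega)
  simp only [this]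
  have : ((m:Int)+1).toNat = m + 1 := by omega
  simp [this]

-- ---- B-side: the closed form ----

-- exact (un-modded) geometric sum: pvG x k = sum_{j<k} x^j
def pvG (x : Int) : Nat → Int
  | 0 => 0
  | k+1 => pvG x k + x^k

theorem pvG_add (x : Int) (a b : Nat) : pvG x (a + b) = pvG x a + x^a * pvG x b := by
  induction b with
  | zero => simp [pvG]
  | succ b ih => simp [pvG, ih, pow_add]; ring

theorem pvModEq_self (a M : Int) : a % M ≡ a [ZMOD M] := by
  unfold Int.ModEq
  exact Int.emod_emod_of_dvd a dvd_rfl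

theorem pvMod65536 (a : Int) : PySem.Int.mod a 65536 = a % 65536 :=
  PySem.Int.mod_eq_emod_of_pos (by norm_num)

theorem pvG_succ_left (x : Int) (k : Nat) : pvG x (k+1) = 1 + x * pvG x k := by
  induction k with
  | zero => simp [pvG]
  | succ k ih =>
    show pvG x (k+1) + x^(k+1) = 1 + x * (pvG x k + x^k)
    rw [ih]
    ring

theorem pvGeo_correct (x : Int) (k : Nat) : pvGeo x k = pvG x k % 65536 := by
  induction k using Nat.strong_induction_on with
  | _ k ih =>
    match k with
    | 0 => simp [pvGeo, pvG]
    | k+1 =>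
      rw [pvGeo]
      simp only [if_neg (Nat.succ_ne_zero k)]
      rw [ih ((k+1)/2) (by omega)]
      have hpow : PySem.Int.powMod x ((k+1)/2) 65536 = x ^ ((k+1)/2) % 65536 := by
        simp [PySem.Int.powMod, PySem.Int.mod_eq_emod_of_pos (by norm_num : (0:Int) < 65536)]
      set m := (k+1)/2 with hm
      have hg2m : pvG x (m + m) = pvG x m * (1 + x ^ m) := by
        rw [pvG_add]; ring
      have hgeq : (pvG x m % 65536 * (1 + x ^ m % 65536)) ≡ pvG x (m+m) [ZMOD 65536] := by
        rw [hg2m]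
        exact (pvModEq_self _ _).mul ((Int.ModEq.refl 1).add (pvModEq_self _ _))
      rcases Nat.even_or_odd (k+1) with ⟨t, ht⟩ | ⟨t, ht⟩
      · have hk : k + 1 = m + m := by omega
        have hpar : (k+1) % 2 = 0 := by omega
        rw [hpar]
        simp only [hpow, pvMod65536]
        rw [← hk] at hgeq
        simpa using hgeq
      · have hk : k + 1 = m + m + 1 := by omega
        have hpar : (k+1) % 2 = 1 := by omega
        rw [hpar]
        simp only [hpow, pvMod65536, if_pos]
        have hgodd : pvG x (k+1) = pvG x (m+m) + x^m * x^m := by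
          rw [hk]; simp [pvG, pow_add]
        rw [hgodd]
        exact ((pvModEq_self _ _).trans hgeq).add ((pvModEq_self _ _).mul (pvModEq_self _ _))

-- the LCG closed form: for k >= 1 the k-th value is (x^k*f + y*sum_{j<k} x^j) mod 2^16
theorem pvLcg_closed (f x y : Int) (k : Nat) :
    pvLcg f x y (k+1) = (x^(k+1) * f + y * pvG x (k+1)) % 65536 := by
  induction k with
  | zero =>
    simp [pvLcg, pvG, pvMod65536, PySem.Int.mod_eq_emod_of_pos]
  | succ k ih =>
    rw [pvLcg, ih, pvMod65536]
    have hG : pvG x (k+1+1) = 1 + x * pvG x (k+1) := pvG_succ_left x (k+1)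
    calc (x * ((x^(k+1) * f + y * pvG x (k+1)) % 65536) + y) % 65536
        = (x * (x^(k+1) * f + y * pvG x (k+1)) + y) % 65536 :=
          ((pvModEq_self _ _).mul_left x).add_right y
      _ = (x^(k+1+1) * f + y * pvG x (k+1+1)) % 65536 := by rw [hG]; ring_nf

-- the value B adds at step k equals the LCG value there
theorem pvB_term (f x y : Int) (k : Nat) :
    PySem.Int.mod (PySem.Int.powMod x (k+1) 65536 * f + y * pvGeo x (k+1)) 65536
      = pvLcg f x y (k+1) := by
  rw [pvGeo_correct, pvLcg_closed]
  simp only [PySem.Int.powMod, pvMod65536]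
  exact ((pvModEq_self _ _).mul_right f).add ((pvModEq_self _ _).mul_left y)

-- ---- B-side invariant ----
theorem pvB_inv (f x y : Int) (N : Nat) (m : Nat) (hm : m + 1 ≤ N) :
    (PySem.List.pyRange 1 ((m : Int) + 1) 1).foldl
      (fun (s : List Int × Int) k =>
        let total := s.2 + PySem.Int.mod (PySem.Int.powMod x k.toNat 65536 * f + y * pvGeo x k.toNat) 65536
        (s.1.set k.toNat total, total))
      ((List.replicate N (0:Int)).set 0 f, f)
    = (pvOut f x y (m+1) ++ List.replicate (N - (m+1)) 0, pvAcc f x y m) := by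
  induction m with
  | zero =>
    simp only [Nat.cast_zero, zero_add]
    rw [PySem.List.pyRange_one_eq_nil (by omega)]
    obtain ⟨N', rfl⟩ : ∃ N', N = N' + 1 := ⟨N - 1, by omega⟩
    simp [pvOut, pvAcc, List.replicate_succ]
  | succ m ih =>
    have h1 : (1:Int) ≤ (m:Int) + 1 := by omega
    push_cast
    rw [PySem.List.pyRange_one_succ_right h1, List.foldl_append, ih (by omega)]
    simp only [List.foldl_cons, List.foldl_nil]
    have hlen : (pvOut f x y (m+1)).length = m + 1 := by simp [pvOut]
    have htoNat : ((m:Int) + 1).toNat = m + 1 := by omega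
    rw [htoNat, pvB_term f x y m, Prod.mk.injEq]
    constructor
    · rw [List.set_append_right _ _ (by omega), hlen]
      have : m + 1 - (m+1) = 0 := by omega
      rw [this]
      obtain ⟨K, hK⟩ : ∃ K, N - (m+1) = K + 1 := ⟨N - (m+2), by omega⟩
      rw [hK, List.replicate_succ, List.set_cons_zero]
      have hN : N - (m+1+1) = K := by omega
      rw [hN]
      simp [pvOut_succ, pvAcc]
    · simp [pvAcc]

theorem pvB_eq (size f x y : Int) (h : 1 ≤ size) :
    get_cum_sum_arr_alt size f x y = pvOut f x y size.toNat := by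
  unfold get_cum_sum_arr_alt
  have hrep : (PySem.List.pyRange 0 size 1).map (fun _ => (0:Int)) = List.replicate size.toNat 0 := by
    rw [PySem.List.pyRange_one]
    simp [List.map_map, Function.comp_def, List.map_const']
  simp only [hrep]
  obtain ⟨m, hm⟩ : ∃ m : Nat, size = (m : Int) + 1 := ⟨(size - 1).toNat, by omega⟩
  subst hm
  have := pvB_inv f x y ((m:Int)+1).toNat m (by omega)
  simp only [this]
  have : ((m:Int)+1).toNat = m + 1 := by omega
  simp [this]

-- ===== VERDICT (by name: the statement is the Claim_ definition above) =====
theorem get_cum_sum_arr_spec : Claim_equal_get_cum_sum_arr := by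
  intro size f x y _ hpre
  unfold Spec_get_cum_sum_arr
  rw [pvA_eq size f x y hpre, pvB_eq size f x y hpre]
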